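-- pv_equiv track=rewrite | github.com/kintopp/dspy-rise-humbench | benchmarks/shared/scoring_helpers.py | filter_parent_keys
-- ===== SOURCE A (Python) =====
-- def filter_parent_keys(keys: list[str]) -> list[str]:
--     """Remove parent keys when child keys exist.
--
--     Checks both dot notation (drop 'a' if 'a.b' exists) and bracket
--     notation (drop 'items' if 'items[0]' exists).
--     """
--     return [
--         key for key in keys
--         if not any(
--             other.startswith(key + ".") or other.startswith(key + "[")
--             for other in keys if other != key
--         )
--     ]
-- ===== SOURCE B (Python) =====
-- def filter_parent_keys(keys: list[str]) -> list[str]: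
--     """Remove parent keys when child keys exist.
--
--     One pass collects, for every key, each prefix that is immediately
--     followed by '.' or '['; a second pass keeps the keys not in that set.
--     """
--     parents = set()
--     for key in keys:
--         for i, ch in enumerate(key):
--             if ch == '.' or ch == '[':
--                 parents.add(key[:i])
--     return [key for key in keys if key not in parents]
-- ===== Notes on version B (the rewrite author's own statement) =====
-- stated objective: faster
-- what changed: Replaces the all-pairs scan (for each key, test every other key with startswith on key+'.'/key+'[') by a single pass that collects every prefix immediately preceding a '.' or '[' into a set, then filters the keys by one set-membership lookup each.
import Mathlib
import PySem

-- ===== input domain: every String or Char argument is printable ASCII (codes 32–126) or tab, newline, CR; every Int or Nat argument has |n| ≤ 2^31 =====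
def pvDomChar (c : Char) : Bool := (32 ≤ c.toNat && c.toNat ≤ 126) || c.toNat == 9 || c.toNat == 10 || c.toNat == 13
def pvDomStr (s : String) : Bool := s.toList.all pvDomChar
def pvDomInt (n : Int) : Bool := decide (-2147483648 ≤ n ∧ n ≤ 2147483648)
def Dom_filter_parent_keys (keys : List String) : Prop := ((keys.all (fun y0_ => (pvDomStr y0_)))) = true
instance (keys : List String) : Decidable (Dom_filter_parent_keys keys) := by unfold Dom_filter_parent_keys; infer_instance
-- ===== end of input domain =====

-- B replaces A's all-pairs startswith scan by one pass collecting every separator-preceding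
-- prefix into a set, then a single membership-filter pass (objective: faster).

-- ===== PORT A =====
-- list comprehension with a not-any over the other keys, startswith on key+"." and key+"["
def filter_parent_keys (keys : List String) : List String :=
  keys.filter (fun key =>
    !((keys.filter (fun other => other ≠ key)).any (fun other =>
        PySem.Str.startswith other (String.ofList (key.toList ++ ['.'])) ||
        PySem.Str.startswith other (String.ofList (key.toList ++ ['['])))))

-- ===== PORT B =====
-- key[:i] with 0 ≤ i ≤ len(key) (i comes from enumerate) is exactly List.take i
def filter_parent_keys_alt (keys : List String) : List String :=
  let parents : PySem.Set String :=
    keys.foldl (fun s key =>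
      (PySem.List.enumerate key.toList).foldl (fun s p =>
        if p.2 = '.' ∨ p.2 = '[' then PySem.Set.add s (String.ofList (key.toList.take p.1.toNat)) else s) s)
      PySem.Set.empty
  keys.filter (fun key => !(PySem.Set.contains parents key))

-- ===== PRECONDITION & SPEC =====
def Spec_filter_parent_keys (keys : List String) (out : List String) : Prop := out = filter_parent_keys_alt keys
instance (keys : List String) (out : List String) : Decidable (Spec_filter_parent_keys keys out) := by unfold Spec_filter_parent_keys; infer_instance

-- ===== CLAIM (what is proved, stated in full; the proofs are below) =====
def Claim_equal_filter_parent_keys : Prop := ∀ (keys : List String), Dom_filter_parent_keys keys → Spec_filter_parent_keys keys (filter_parent_keys keys)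

-- ===== LEMMAS AND PROOFS =====

-- shared characterisation: k is a parent of some key in keys
def IsParent (keys : List String) (k : String) : Prop :=
  ∃ o ∈ keys, ∃ c : Char, (c = '.' ∨ c = '[') ∧ (k.toList ++ [c]) <+: o.toList

lemma mem_foldl_add_if {α β : Type} [BEq α] [LawfulBEq α]
    (l : List β) (c : β → Prop) [DecidablePred c] (f : β → α) (s : PySem.Set α) (x : α) :
    (x ∈ l.foldl (fun s b => if c b then PySem.Set.add s (f b) else s) s) ↔
      x ∈ s ∨ ∃ b ∈ l, c b ∧ x = f b := by
  induction l generalizing s with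
  | nil => simp
  | cons b l ih =>
    simp only [List.foldl_cons, ih, List.mem_cons]
    by_cases h : c b
    · simp only [if_pos h, PySem.Set.mem_add]
      constructor
      · rintro ((hs | rfl) | ⟨b', hb', hc', hx⟩)
        exacts [Or.inl hs, Or.inr ⟨b, Or.inl rfl, h, rfl⟩, Or.inr ⟨b', Or.inr hb', hc', hx⟩]
      · rintro (hs | ⟨b', (rfl | hb'), hc', hx⟩)
        exacts [Or.inl (Or.inl hs), Or.inl (Or.inr hx), Or.inr ⟨b', hb', hc', hx⟩]
    · simp only [if_neg h]
      constructor
      · rintro (hs | ⟨b', hb', hc', hx⟩)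
        exacts [Or.inl hs, Or.inr ⟨b', Or.inr hb', hc', hx⟩]
      · rintro (hs | ⟨b', (rfl | hb'), hc', hx⟩)
        exacts [Or.inl hs, absurd hc' h, Or.inr ⟨b', hb', hc', hx⟩]

lemma mem_parents (keys : List String) (x : String) :
    (x ∈ keys.foldl (fun s key =>
        (PySem.List.enumerate key.toList).foldl (fun s p =>
          if p.2 = '.' ∨ p.2 = '[' then PySem.Set.add s (String.ofList (key.toList.take p.1.toNat)) else s) s)
        PySem.Set.empty) ↔
      ∃ key ∈ keys, ∃ p ∈ PySem.List.enumerate key.toList,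
        (p.2 = '.' ∨ p.2 = '[') ∧ x = String.ofList (key.toList.take p.1.toNat) := by
  have gen : ∀ (s : PySem.Set String),
      (x ∈ keys.foldl (fun s key =>
          (PySem.List.enumerate key.toList).foldl (fun s p =>
            if p.2 = '.' ∨ p.2 = '[' then PySem.Set.add s (String.ofList (key.toList.take p.1.toNat)) else s) s) s) ↔
        x ∈ s ∨ ∃ key ∈ keys, ∃ p ∈ PySem.List.enumerate key.toList,
          (p.2 = '.' ∨ p.2 = '[') ∧ x = String.ofList (key.toList.take p.1.toNat) := by
    induction keys with
    | nil => simp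
    | cons k ks ih =>
      intro s
      rw [List.foldl_cons, ih,
        mem_foldl_add_if (c := fun p : Int × Char => p.2 = '.' ∨ p.2 = '[')]
      simp only [List.mem_cons]
      constructor
      · rintro ((hs | ⟨p, hp, hc, hx⟩) | ⟨key, hk, rest⟩)
        exacts [Or.inl hs, Or.inr ⟨k, Or.inl rfl, p, hp, hc, hx⟩, Or.inr ⟨key, Or.inr hk, rest⟩]
      · rintro (hs | ⟨key, (rfl | hk), rest⟩)
        exacts [Or.inl (Or.inl hs), Or.inl (Or.inr rest), Or.inr ⟨key, hk, rest⟩]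
  simpa using gen PySem.Set.empty

-- B's parent set ↔ IsParent
lemma parents_iff_isParent (keys : List String) (x : String) :
    (∃ key ∈ keys, ∃ p ∈ PySem.List.enumerate key.toList,
        (p.2 = '.' ∨ p.2 = '[') ∧ x = String.ofList (key.toList.take p.1.toNat)) ↔
      IsParent keys x := by
  constructor
  · rintro ⟨key, hk, p, hp, hc, hx⟩
    rw [PySem.List.mem_enumerate_iff] at hp
    obtain ⟨n, hn, rfl⟩ := hp
    refine ⟨key, hk, key.toList[n], hc, ?_⟩
    have hx' : x.toList = key.toList.take n := by subst hx; simp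
    rw [hx']
    have : key.toList.take n ++ [key.toList[n]] = key.toList.take (n + 1) := by
      rw [List.take_add_one]
      simp [List.getElem?_eq_getElem hn]
    rw [this]
    exact List.take_prefix _ _
  · rintro ⟨o, ho, c, hc, hpre⟩
    obtain ⟨t, ht⟩ := hpre
    have hL : o.toList = x.toList ++ c :: t := by rw [← ht]; simp
    refine ⟨o, ho, ((x.toList.length : Int), c), ?_, hc, ?_⟩
    · rw [PySem.List.mem_enumerate_iff]
      refine ⟨x.toList.length, by rw [hL]; simp, ?_⟩
      have h2 : o.toList[x.toList.length]'(by rw [hL]; simp) = c := by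
        simp [hL]
      simp only [Prod.mk.injEq]
      exact ⟨by simp, h2.symm⟩
    · rw [hL]
      simp [List.take_left]

-- A's dropped-condition ↔ IsParent
lemma any_iff_isParent (keys : List String) (key : String) :
    ((keys.filter (fun other => other ≠ key)).any (fun other =>
        PySem.Str.startswith other (String.ofList (key.toList ++ ['.'])) ||
        PySem.Str.startswith other (String.ofList (key.toList ++ ['['])))) = true ↔
      IsParent keys key := by
  rw [List.any_eq_true]
  constructor
  · rintro ⟨o, ho, hcond⟩
    rw [List.mem_filter] at ho
    rw [Bool.or_eq_true, PySem.Str.startswith_eq, PySem.Str.startswith_eq,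
        PySem.Chars.startswith_iff, PySem.Chars.startswith_iff, String.toList_ofList,
        String.toList_ofList] at hcond
    rcases hcond with h | h
    · exact ⟨o, ho.1, '.', Or.inl rfl, h⟩
    · exact ⟨o, ho.1, '[', Or.inr rfl, h⟩
  · rintro ⟨o, ho, c, hc, hpre⟩
    have hne : o ≠ key := by
      intro h
      subst h
      have := hpre.length_le
      simp at this
    refine ⟨o, List.mem_filter.mpr ⟨ho, by simpa using hne⟩, ?_⟩
    rw [Bool.or_eq_true, PySem.Str.startswith_eq, PySem.Str.startswith_eq,
        PySem.Chars.startswith_iff, PySem.Chars.startswith_iff, String.toList_ofList,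
        String.toList_ofList]
    rcases hc with rfl | rfl
    · exact Or.inl hpre
    · exact Or.inr hpre

-- ===== VERDICT (by name: the statement is the Claim_ definition above) =====
theorem filter_parent_keys_spec : Claim_equal_filter_parent_keys := by
  intro keys _
  unfold Spec_filter_parent_keys filter_parent_keys filter_parent_keys_alt
  refine List.filter_congr ?_
  intro key _
  congr 1
  rw [Bool.eq_iff_iff, any_iff_isParent]
  rw [show ∀ (s : PySem.Set String), (PySem.Set.contains s key = true) ↔ key ∈ s from
    fun s => by simp [PySem.Set.contains]]
  rw [mem_parents, parents_iff_isParent]
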